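-- pv_equiv track=rewrite | github.com/KBVE/kbve | packages/python/kbve/kbve/nx/graph.py | collect_edges
-- ===== SOURCE A (Python) =====
-- def collect_edges(
--     deps: dict[str, list[dict[str, str]]],
-- ) -> tuple[set[tuple[str, str]], dict[str, list[str]]]:
--     """Collect unique directed edges from Nx dependency data.
--
--     Returns ``(edge_set, edges_by_source)``.
--     """
--     seen: set[tuple[str, str]] = set()
--     by_source: dict[str, list[str]] = {}
--     for dep_list in deps.values():
--         for d in dep_list:
--             edge = (d["source"], d["target"])
--             if edge not in seen:
--                 seen.add(edge)
--                 by_source.setdefault(d["source"], []).append(d["target"])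
--     return seen, by_source
-- ===== SOURCE B (Python) =====
-- def collect_edges(
--     deps: dict[str, list[dict[str, str]]],
-- ) -> tuple[set[tuple[str, str]], dict[str, list[str]]]:
--     """Collect unique directed edges from Nx dependency data.
--
--     Returns ``(edge_set, edges_by_source)``.
--     """
--     # Single structure maintained in the loop: per-source target lists with
--     # per-source dedup (equivalent to global edge dedup, since an edge is the
--     # full (source, target) pair).
--     by_source: dict[str, list[str]] = {}
--     for dep_list in deps.values():
--         for d in dep_list:
--             targets = by_source.setdefault(d["source"], [])
--             if d["target"] not in targets:
--                 targets.append(d["target"])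
--     # The edge set is derived in a separate pass, not maintained incrementally.
--     seen = {(d["source"], d["target"]) for dep_list in deps.values() for d in dep_list}
--     return seen, by_source
-- ===== Notes on version B (the rewrite author's own statement) =====
-- stated objective: simpler
-- what changed: The loop maintains only by_source with a per-source membership test (no incremental seen-set); the edge set is derived afterwards in a separate flattening/comprehension pass, instead of maintaining both structures at once.
import Mathlib
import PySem

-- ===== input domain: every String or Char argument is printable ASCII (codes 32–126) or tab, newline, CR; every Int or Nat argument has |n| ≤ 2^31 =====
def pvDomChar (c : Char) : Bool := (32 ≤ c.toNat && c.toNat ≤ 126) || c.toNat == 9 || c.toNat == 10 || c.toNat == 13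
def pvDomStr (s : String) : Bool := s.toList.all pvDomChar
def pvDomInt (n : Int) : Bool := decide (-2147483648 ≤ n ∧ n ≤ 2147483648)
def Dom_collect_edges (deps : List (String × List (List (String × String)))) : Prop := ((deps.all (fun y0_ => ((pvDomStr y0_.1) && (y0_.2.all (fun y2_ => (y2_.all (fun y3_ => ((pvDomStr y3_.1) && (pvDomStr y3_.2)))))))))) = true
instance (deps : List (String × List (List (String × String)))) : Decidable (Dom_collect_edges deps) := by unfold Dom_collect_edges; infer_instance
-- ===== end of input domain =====

-- B maintains only by_source in the loop (per-source dedup) and derives the edge set in a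
-- separate flattening pass afterwards; A maintains the seen-set and by_source together.

-- ===== PORT A =====
-- A's inner loop body: guard on the global seen-set, update both structures
def pvRowA (st : PySem.Set (String × String) × PySem.Dict String (List String))
    (d : List (String × String)) :
    PySem.Set (String × String) × PySem.Dict String (List String) :=
  let dd := PySem.Dict.ofList d
  let edge := (dd.getD "source" "", dd.getD "target" "")
  if PySem.Set.contains st.1 edge then st
  else (PySem.Set.add st.1 edge, st.2.modify edge.1 [] (· ++ [edge.2]))

def collect_edges (deps : List (String × List (List (String × String)))) : (List (String × String)) × (List (String × List String)) :=
  let r := (PySem.Dict.ofList deps).values.foldl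
    (fun st dep_list => dep_list.foldl pvRowA st)
    ((PySem.Set.empty : PySem.Set (String × String)),
     (PySem.Dict.empty : PySem.Dict String (List String)))
  (r.1, r.2.items)

-- ===== PORT B =====
-- B's inner loop body: setdefault, then append the target only if not already present
def pvRowB (bs : PySem.Dict String (List String)) (d : List (String × String)) :
    PySem.Dict String (List String) :=
  let dd := PySem.Dict.ofList d
  let targets_dict := bs.setdefault (dd.getD "source" "") []
  if (targets_dict.getD (dd.getD "source" "") []).contains (dd.getD "target" "") then
    targets_dict
  else targets_dict.modify (dd.getD "source" "") [] (· ++ [dd.getD "target" ""])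

-- the edge a row contributes, as in B's set comprehension
def pvEdgeOf (d : List (String × String)) : String × String :=
  ((PySem.Dict.ofList d).getD "source" "", (PySem.Dict.ofList d).getD "target" "")

def collect_edges_alt (deps : List (String × List (List (String × String)))) : (List (String × String)) × (List (String × List String)) :=
  let vals := (PySem.Dict.ofList deps).values
  let by_source := vals.foldl
    (fun bs dep_list => dep_list.foldl pvRowB bs)
    (PySem.Dict.empty : PySem.Dict String (List String))
  let seen := PySem.Set.ofList ((vals.flatMap (fun dep_list => dep_list)).map pvEdgeOf)
  (seen, by_source.items)

-- ===== PRECONDITION & SPEC =====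
-- Pre_ excludes exactly the inputs where some inner dict lacks the key "source" or "target",
-- on which the Python A raises KeyError (returns nothing).
def Pre_collect_edges (deps : List (String × List (List (String × String)))) : Prop :=
  (deps.all (fun p => p.2.all (fun d =>
    d.any (fun kv => kv.1 == "source") && d.any (fun kv => kv.1 == "target")))) = true

instance (deps : List (String × List (List (String × String)))) : Decidable (Pre_collect_edges deps) := by unfold Pre_collect_edges; infer_instance

def pvWitness_collect_edges : (List (String × List (List (String × String)))) :=
  [("app", [[("source", "a"), ("target", "b")], [("source", "a"), ("target", "b")]]),
   ("lib", [[("source", "b"), ("target", "c")]])]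

def Spec_collect_edges (deps : List (String × List (List (String × String)))) (out : (List (String × String)) × (List (String × List String))) : Prop := out = collect_edges_alt deps
instance (deps : List (String × List (List (String × String)))) (out : (List (String × String)) × (List (String × List String))) : Decidable (Spec_collect_edges deps out) := by unfold Spec_collect_edges; infer_instance

-- ===== CLAIM (what is proved, stated in full; the proofs are below) =====
def Claim_equal_collect_edges : Prop := ∀ (deps : List (String × List (List (String × String)))), Dom_collect_edges deps → Pre_collect_edges deps → Spec_collect_edges deps (collect_edges deps)

-- ===== LEMMAS AND PROOFS =====

-- the relation between A's seen set and the by_source dict along the loop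
def pvInv (seen : PySem.Set (String × String)) (bs : PySem.Dict String (List String)) : Prop :=
  ∀ s t : String, (s, t) ∈ seen ↔ t ∈ bs.getD s []

lemma pv_nested {σ : Type} (f : σ → List (String × String) → σ)
    (L : List (List (List (String × String)))) (st : σ) :
    L.foldl (fun st dep_list => dep_list.foldl f st) st
      = (L.flatMap (fun dep_list => dep_list)).foldl f st := by
  induction L generalizing st with
  | nil => rfl
  | cons dl L ih => simp only [List.foldl_cons, List.flatMap_cons, List.foldl_append, ih]

lemma pv_setdefault_modify (bs : PySem.Dict String (List String)) (k : String)
    (f : List String → List String) :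
    (bs.setdefault k []).modify k [] f = bs.modify k [] f := by
  by_cases h : bs.contains k = true
  · rw [PySem.Dict.setdefault_of_contains bs [] h]
  · have h' : bs.contains k = false := by simpa using h
    rw [PySem.Dict.setdefault_of_not_contains bs [] h']
    have hmap : ∀ p ∈ bs.items, (p.1 == k) = false := by
      intro p hp
      apply beq_eq_false_iff_ne.2
      intro hpk
      have hk : k ∈ bs.keys := by
        have := List.mem_map_of_mem (f := Prod.fst) hp
        simpa [PySem.Dict.keys, hpk] using this
      have hct := (PySem.Dict.contains_iff_mem_keys bs k).2 hk
      rw [h'] at hct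
      exact Bool.noConfusion hct
    simp only [PySem.Dict.modify, PySem.Dict.getD_insert_self,
      PySem.Dict.getD_of_not_contains bs [] h']
    apply PySem.Dict.ext
    rw [PySem.Dict.items_insert_of_contains _ _ (PySem.Dict.contains_insert_self bs k []),
        PySem.Dict.items_insert_of_not_contains _ _ h',
        PySem.Dict.items_insert_of_not_contains _ _ h']
    simp only [List.map_append]
    congr 1
    · have hmapid : List.map (fun p => if (p.1 == k) = true then (k, f []) else p) bs.items
          = List.map id bs.items := List.map_congr_left (fun p hp => by simp [hmap p hp])
      simpa using hmapid
    · simp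

lemma pv_main (rows : List (List (String × String))) (seen : PySem.Set (String × String))
    (bs : PySem.Dict String (List String)) (hinv : pvInv seen bs) :
    rows.foldl pvRowA (seen, bs)
      = (rows.foldl (fun s d => PySem.Set.add s (pvEdgeOf d)) seen, rows.foldl pvRowB bs) := by
  induction rows generalizing seen bs with
  | nil => rfl
  | cons d rows ih =>
      set s := (PySem.Dict.ofList d).getD "source" "" with hs_def
      set t := (PySem.Dict.ofList d).getD "target" "" with ht_def
      by_cases hmem : (s, t) ∈ seen
      · have ht : t ∈ bs.getD s [] := (hinv s t).1 hmem
        have hbsc : bs.contains s = true := by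
          by_contra hno
          rw [PySem.Dict.getD_of_not_contains bs [] (by simpa using hno)] at ht
          simp at ht
        have hrowB : pvRowB bs d = bs := by
          simp [pvRowB, ← hs_def, ← ht_def, PySem.Dict.setdefault_of_contains bs [] hbsc, ht]
        have hrowA : pvRowA (seen, bs) d = (seen, bs) := by
          simp [pvRowA, ← hs_def, ← ht_def, hmem]
        have hadd : PySem.Set.add seen (pvEdgeOf d) = seen := by
          simp [PySem.Set.add, pvEdgeOf, ← hs_def, ← ht_def, hmem]
        simp only [List.foldl_cons, hrowA, hrowB, hadd]
        exact ih seen bs hinv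
      · have ht : t ∉ bs.getD s [] := fun h => hmem ((hinv s t).2 h)
        have hrowA : pvRowA (seen, bs) d = (PySem.Set.add seen (s, t), bs.modify s [] (· ++ [t])) := by
          simp [pvRowA, ← hs_def, ← ht_def, hmem]
        have hrowB : pvRowB bs d = bs.modify s [] (· ++ [t]) := by
          have hg : (bs.setdefault s []).getD s [] = bs.getD s [] := by
            simpa using PySem.Dict.getD_setdefault_self bs s ([] : List String) []
          simp only [pvRowB, ← hs_def, ← ht_def, hg]
          rw [if_neg (by simpa [List.contains_iff_mem] using ht)]
          exact pv_setdefault_modify bs s _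
        have hedge : pvEdgeOf d = (s, t) := rfl
        have hinv' : pvInv (PySem.Set.add seen (s, t)) (bs.modify s [] (· ++ [t])) := by
          intro s' t'
          rw [PySem.Set.mem_add, PySem.Dict.getD_modify]
          by_cases hs : s' = s
          · rw [if_pos hs]
            simp [hs, Prod.ext_iff, hinv s t']
          · rw [if_neg hs]
            simp [Prod.ext_iff, hs, hinv s' t']
        simp only [List.foldl_cons, hrowA, hrowB, hedge]
        exact ih _ _ hinv'

lemma pv_inv_empty : pvInv PySem.Set.empty PySem.Dict.empty := by
  intro s t
  simp [PySem.Set.empty, PySem.Dict.getD_empty]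

-- ===== VERDICT (by name: the statement is the Claim_ definition above) =====
theorem collect_edges_spec : Claim_equal_collect_edges := by
  intro deps _ _
  show collect_edges deps = collect_edges_alt deps
  simp only [collect_edges, collect_edges_alt]
  rw [pv_nested pvRowA, pv_nested pvRowB,
      pv_main _ _ _ pv_inv_empty, PySem.Set.ofList_eq_foldl, List.foldl_map]
  rfl
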